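-- pv_equiv track=rewrite | github.com/0x6f6f66/Algorithms-In-Python | Structy/Mixed_Recall/breaking_boundaries.py | breaking_boundaries
-- ===== SOURCE A (Python) =====
-- def breaking_boundaries(m, n, k, r, c, memo=None):
--     if memo is None:
--         memo = {}
--
--     rowInbounds = 0 <= r < m
--     colInbounds = 0 <= c < n
--
--     if not rowInbounds or not colInbounds:
--         return 1
--
--     if k == 0:
--         return 0
--
--     pos = (r, c, k)
--     if pos in memo:
--         return memo[pos]
--
--     ways = 0
--     ways += breaking_boundaries(m, n, k - 1, r + 1, c, memo)
--     ways += breaking_boundaries(m, n, k - 1, r, c + 1, memo)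
--     ways += breaking_boundaries(m, n, k - 1, r - 1, c, memo)
--     ways += breaking_boundaries(m, n, k - 1, r, c - 1, memo)
--
--     memo[pos] = ways
--     return memo[pos]
-- ===== SOURCE B (Python) =====
-- def breaking_boundaries(m, n, k, r, c, memo=None):
--     # bottom-up layered DP over the grid instead of memoized recursion;
--     # stop early once a layer is a fixpoint (all later layers are identical)
--     if not (0 <= r < m and 0 <= c < n):
--         return 1
--     dp = [[0] * n for _ in range(m)]
--     for _ in range(k):
--         new = [[sum(1 if not (0 <= rr < m and 0 <= cc < n) else dp[rr][cc]
--                     for rr, cc in ((i + 1, j), (i, j + 1), (i - 1, j), (i, j - 1)))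
--                 for j in range(n)] for i in range(m)]
--         if new == dp:
--             break
--         dp = new
--     return dp[r][c]
-- ===== Notes on version B (the rewrite author's own statement) =====
-- stated objective: alternative
-- what changed: Replaced top-down memoized recursion over (r,c,k) with an iterative bottom-up layered DP that sweeps the whole grid per remaining-move count, stopping early when a layer is a fixpoint.
-- intended difference: On an in-bounds start of a 1x1 grid with negative k, A returns 4 because it checks bounds before k; B returns 0, the intended count since there are no paths of a negative number of moves. — e.g. on breaking_boundaries(1, 1, -1, 0, 0): A returns 4, B returns 0
-- outside the precondition, e.g. on breaking_boundaries(2, 1, 960, 0, 0): A returns 2880, B returns 2880; on breaking_boundaries(2, 1, -1, 0, 0): A raises RecursionError, B returns 0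
import Mathlib
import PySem

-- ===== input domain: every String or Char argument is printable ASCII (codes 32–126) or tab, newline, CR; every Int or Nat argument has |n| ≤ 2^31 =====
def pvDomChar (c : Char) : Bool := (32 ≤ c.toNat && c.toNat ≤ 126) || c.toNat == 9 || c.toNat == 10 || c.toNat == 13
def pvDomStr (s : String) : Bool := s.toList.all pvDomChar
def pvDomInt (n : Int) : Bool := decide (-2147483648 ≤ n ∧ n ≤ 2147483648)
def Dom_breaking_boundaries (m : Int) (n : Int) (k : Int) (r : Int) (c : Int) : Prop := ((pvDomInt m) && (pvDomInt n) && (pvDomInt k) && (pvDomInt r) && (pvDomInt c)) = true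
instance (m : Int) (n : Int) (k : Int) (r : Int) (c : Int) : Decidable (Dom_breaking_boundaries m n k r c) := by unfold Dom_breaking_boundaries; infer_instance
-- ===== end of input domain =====

-- B replaces A's memoized recursion by an iterative bottom-up layered grid DP with a
-- fixpoint early-exit (same cost, different strategy); equivalence is about the return value.

-- ===== PORT A =====
-- literal port of A's memoized recursion; the Dict is threaded through the four
-- sequential recursive calls exactly as Python's shared memo is. fuel = k.toNat + 1
-- only makes the recursion total; it is never exhausted on inputs in Pre_.
def bbARec (fuel : Nat) (m n k r c : Int)
    (memo : PySem.Dict (Int × Int × Int) Int) : Int × PySem.Dict (Int × Int × Int) Int :=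
  if ¬(0 ≤ r ∧ r < m) ∨ ¬(0 ≤ c ∧ c < n) then (1, memo)
  else if k = 0 then (0, memo)
  else
    match memo.get? (r, c, k) with
    | some v => (v, memo)
    | none =>
      match fuel with
      | 0 => (0, memo)  -- fuel guard, unreachable inside Pre_
      | Nat.succ fuel' =>
        let p1 := bbARec fuel' m n (k - 1) (r + 1) c memo
        let p2 := bbARec fuel' m n (k - 1) r (c + 1) p1.2
        let p3 := bbARec fuel' m n (k - 1) (r - 1) c p2.2
        let p4 := bbARec fuel' m n (k - 1) r (c - 1) p3.2
        let ways := p1.1 + p2.1 + p3.1 + p4.1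
        (ways, p4.2.insert (r, c, k) ways)

def breaking_boundaries (m : Int) (n : Int) (k : Int) (r : Int) (c : Int) : Int :=
  (bbARec (k.toNat + 1) m n k r c PySem.Dict.empty).1

-- ===== PORT B =====
-- 1 if the neighbor is off-grid, else its entry of the previous layer
def bbNeighbor (m n : Int) (dp : List (List Int)) (rr cc : Int) : Int :=
  if ¬(0 ≤ rr ∧ rr < m ∧ 0 ≤ cc ∧ cc < n) then 1 else (dp.getD rr.toNat []).getD cc.toNat 0

-- one grid sweep: next layer from the previous one
def bbStep (m n : Int) (dp : List (List Int)) : List (List Int) :=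
  (List.range m.toNat).map (fun (i : Nat) => (List.range n.toNat).map (fun (j : Nat) =>
    bbNeighbor m n dp ((i : Int) + 1) (j : Int) + bbNeighbor m n dp (i : Int) ((j : Int) + 1) +
    bbNeighbor m n dp ((i : Int) - 1) (j : Int) + bbNeighbor m n dp (i : Int) ((j : Int) - 1)))

-- Source B's loop: up to s sweeps, breaking once a sweep leaves the layer unchanged
def bbLoop (m n : Int) : Nat → List (List Int) → List (List Int)
  | 0, dp => dp
  | s + 1, dp =>
      let new := bbStep m n dp
      if new = dp then dp else bbLoop m n s new

def breaking_boundaries_alt (m : Int) (n : Int) (k : Int) (r : Int) (c : Int) : Int :=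
  if ¬(0 ≤ r ∧ r < m ∧ 0 ≤ c ∧ c < n) then 1
  else
    let dp0 : List (List Int) :=
      (List.range m.toNat).map (fun _ => (List.range n.toNat).map (fun _ => (0 : Int)))
    let dp := bbLoop m n k.toNat dp0
    (dp.getD r.toNat []).getD c.toNat 0

-- ===== PRECONDITION & SPEC =====
-- Pre_ excludes in-bounds starts on grids of at least two cells with k outside
-- [0, 950]: there A's recursion depth grows like k (for negative k, without bound),
-- so A raises RecursionError at Python's ~1000 recursion limit; the margin below
-- that limit is small. 1×1 grids (where A returns without deep recursion for every
-- k) and out-of-bounds starts are admitted for all k.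
def Pre_breaking_boundaries (m : Int) (n : Int) (k : Int) (r : Int) (c : Int) : Prop :=
  ¬(0 ≤ r ∧ r < m ∧ 0 ≤ c ∧ c < n) ∨ (m = 1 ∧ n = 1) ∨ (0 ≤ k ∧ k ≤ 950)
instance (m : Int) (n : Int) (k : Int) (r : Int) (c : Int) : Decidable (Pre_breaking_boundaries m n k r c) := by unfold Pre_breaking_boundaries; infer_instance

def pvWitness_breaking_boundaries : Int × Int × Int × Int × Int := (3, 4, 3, 1, 2)

-- On an in-bounds start of a 1×1 grid with negative k, A returns 4 because it checks
-- bounds before k; B returns 0, the intended count since there are no paths of a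
-- negative number of moves.
def D_breaking_boundaries (m : Int) (n : Int) (k : Int) (r : Int) (c : Int) : Prop :=
  k < 0 ∧ m = 1 ∧ n = 1 ∧ r = 0 ∧ c = 0
instance (m : Int) (n : Int) (k : Int) (r : Int) (c : Int) : Decidable (D_breaking_boundaries m n k r c) := by unfold D_breaking_boundaries; infer_instance

def Spec_breaking_boundaries (m : Int) (n : Int) (k : Int) (r : Int) (c : Int) (out : Int) : Prop := ¬ D_breaking_boundaries m n k r c → out = breaking_boundaries_alt m n k r c
instance (m : Int) (n : Int) (k : Int) (r : Int) (c : Int) (out : Int) : Decidable (Spec_breaking_boundaries m n k r c out) := by unfold Spec_breaking_boundaries; infer_instance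

def pvDiffWitness_breaking_boundaries : Int × Int × Int × Int × Int := (1, 1, -1, 0, 0)
def pvDiffWitnessOut_breaking_boundaries : Int × Int := (4, 0)

-- ===== CLAIM (what is proved, stated in full; the proofs are below) =====
def Claim_unchanged_breaking_boundaries : Prop := ∀ (m : Int) (n : Int) (k : Int) (r : Int) (c : Int), Dom_breaking_boundaries m n k r c → Pre_breaking_boundaries m n k r c → Spec_breaking_boundaries m n k r c (breaking_boundaries m n k r c)
def Claim_changed_breaking_boundaries : Prop := Dom_breaking_boundaries (pvDiffWitness_breaking_boundaries.1) (pvDiffWitness_breaking_boundaries.2.1) (pvDiffWitness_breaking_boundaries.2.2.1) (pvDiffWitness_breaking_boundaries.2.2.2.1) (pvDiffWitness_breaking_boundaries.2.2.2.2) ∧ Pre_breaking_boundaries (pvDiffWitness_breaking_boundaries.1) (pvDiffWitness_breaking_boundaries.2.1) (pvDiffWitness_breaking_boundaries.2.2.1) (pvDiffWitness_breaking_boundaries.2.2.2.1) (pvDiffWitness_breaking_boundaries.2.2.2.2) ∧ D_breaking_boundaries (pvDiffWitness_breaking_boundaries.1) (pvDiffWitness_breaking_boundaries.2.1) (pvDiffWitness_breaking_boundaries.2.2.1)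 (pvDiffWitness_breaking_boundaries.2.2.2.1) (pvDiffWitness_breaking_boundaries.2.2.2.2) ∧ breaking_boundaries (pvDiffWitness_breaking_boundaries.1) (pvDiffWitness_breaking_boundaries.2.1) (pvDiffWitness_breaking_boundaries.2.2.1) (pvDiffWitness_breaking_boundaries.2.2.2.1) (pvDiffWitness_breaking_boundaries.2.2.2.2) = pvDiffWitnessOut_breaking_boundaries.1 ∧ breaking_boundaries_alt (pvDiffWitness_breaking_boundaries.1) (pvDiffWitness_breaking_boundaries.2.1) (pvDiffWitness_breaking_boundaries.2.2.1) (pvDiffWitness_breaking_boundaries.2.2.2.1) (pvDiffWitness_breaking_boundaries.2.2.2.2) = pvDiffWitnessOut_breaking_boundaries.2 ∧ pvDiffWitnessOut_breaking_boundaries.1 ≠ pvDiffWitnessOut_breaking_boundaries.2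
def Claim_exact_breaking_boundaries : Prop := ∀ (m : Int) (n : Int) (k : Int) (r : Int) (c : Int), Dom_breaking_boundaries m n k r c → Pre_breaking_boundaries m n k r c → D_breaking_boundaries m n k r c → breaking_boundaries m n k r c ≠ breaking_boundaries_alt m n k r c

-- ===== LEMMAS AND PROOFS =====

-- the mathematical recurrence both programs compute
def bbW (m n : Int) : Nat → Int → Int → Int
  | 0, r, c => if 0 ≤ r ∧ r < m ∧ 0 ≤ c ∧ c < n then 0 else 1
  | s + 1, r, c =>
      if 0 ≤ r ∧ r < m ∧ 0 ≤ c ∧ c < n then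
        bbW m n s (r + 1) c + bbW m n s r (c + 1) + bbW m n s (r - 1) c + bbW m n s r (c - 1)
      else 1

lemma bbW_oob (m n : Int) (s : Nat) (r c : Int) (h : ¬(0 ≤ r ∧ r < m ∧ 0 ≤ c ∧ c < n)) :
    bbW m n s r c = 1 := by
  cases s <;> simp [bbW, h]

def GoodMemo (m n : Int) (memo : PySem.Dict (Int × Int × Int) Int) : Prop :=
  ∀ r c kk v, memo.get? (r, c, kk) = some v → v = bbW m n kk.toNat r c

lemma bbARec_correct (m n : Int) : ∀ (fuel : Nat) (k r c : Int)
    (memo : PySem.Dict (Int × Int × Int) Int), 0 ≤ k → k.toNat < fuel → GoodMemo m n memo →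
    (bbARec fuel m n k r c memo).1 = bbW m n k.toNat r c ∧
      GoodMemo m n (bbARec fuel m n k r c memo).2 := by
  intro fuel
  induction fuel with
  | zero => intro k r c memo hk hf _; omega
  | succ fuel ih =>
    intro k r c memo hk hf hgood
    by_cases hin : 0 ≤ r ∧ r < m ∧ 0 ≤ c ∧ c < n
    · by_cases hk0 : k = 0
      · subst hk0
        simp [bbARec, bbW, hin.1, hin.2.1, hin.2.2.1, hin.2.2.2]
        exact hgood
      · have hrow : ¬(¬(0 ≤ r ∧ r < m) ∨ ¬(0 ≤ c ∧ c < n)) := by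
          push_neg; exact ⟨⟨hin.1, hin.2.1⟩, hin.2.2.1, hin.2.2.2⟩
        rw [bbARec, if_neg hrow, if_neg hk0]
        cases hmemo : memo.get? (r, c, k) with
        | some v =>
          simp only
          exact ⟨hgood r c k v hmemo, hgood⟩
        | none =>
          simp only
          have hk1 : (k - 1).toNat < fuel := by omega
          have hk1' : 0 ≤ k - 1 := by omega
          obtain ⟨e1, g1⟩ := ih (k - 1) (r + 1) c memo hk1' hk1 hgood
          obtain ⟨e2, g2⟩ := ih (k - 1) r (c + 1) _ hk1' hk1 g1
          obtain ⟨e3, g3⟩ := ih (k - 1) (r - 1) c _ hk1' hk1 g2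
          obtain ⟨e4, g4⟩ := ih (k - 1) r (c - 1) _ hk1' hk1 g3
          have hW : bbW m n k.toNat r c =
              bbW m n (k - 1).toNat (r + 1) c + bbW m n (k - 1).toNat r (c + 1) +
              bbW m n (k - 1).toNat (r - 1) c + bbW m n (k - 1).toNat r (c - 1) := by
            have hsk : k.toNat = (k - 1).toNat + 1 := by omega
            rw [hsk, bbW, if_pos hin]
          refine ⟨by rw [e1, e2, e3, e4, hW], ?_⟩
          intro r' c' kk' v' hget
          rw [PySem.Dict.get?_insert] at hget
          split_ifs at hget with heq
          · obtain ⟨h1, h2, h3⟩ : r' = r ∧ c' = c ∧ kk' = k := by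
              simpa [Prod.ext_iff] using heq
            subst h1; subst h2; subst h3
            injection hget with hv
            rw [← hv, e1, e2, e3, e4, hW]
          · exact g4 r' c' kk' v' hget
    · have hrow : ¬(0 ≤ r ∧ r < m) ∨ ¬(0 ≤ c ∧ c < n) := by
        by_contra hcon
        push_neg at hcon
        exact hin ⟨hcon.1.1, hcon.1.2, hcon.2.1, hcon.2.2⟩
      rw [bbARec, if_pos hrow]
      exact ⟨(bbW_oob m n k.toNat r c hin).symm, hgood⟩

-- the break is sound: bbLoop computes exactly s iterated sweeps
lemma bbLoop_eq_iterate (m n : Int) : ∀ (s : Nat) (d : List (List Int)),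
    bbLoop m n s d = (bbStep m n)^[s] d := by
  intro s
  induction s with
  | zero => intro d; rfl
  | succ s ih =>
    intro d
    rw [bbLoop]
    split_ifs with h
    · rw [Function.iterate_fixed h]
    · rw [ih (bbStep m n d), ← Function.iterate_succ_apply]

-- getD of a mapped range
lemma getD_map_range {α : Type} (N : Nat) (f : Nat → α) (d : α) (i : Nat) (h : i < N) :
    ((List.range N).map f).getD i d = f i := by
  rw [List.getD_eq_getElem?_getD]
  simp [h]

-- the table after s sweeps holds bbW s on every in-range cell
lemma table_correct (m n : Int) : ∀ (s : Nat) (i j : Nat), i < m.toNat → j < n.toNat →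
    (((bbStep m n)^[s]
        ((List.range m.toNat).map (fun _ => (List.range n.toNat).map (fun _ => (0 : Int))))).getD i []).getD j 0
      = bbW m n s (i : Int) (j : Int) := by
  intro s
  induction s with
  | zero =>
    intro i j hi hj
    have hin : 0 ≤ (i : Int) ∧ (i : Int) < m ∧ 0 ≤ (j : Int) ∧ (j : Int) < n := by omega
    simp only [Function.iterate_zero, id]
    rw [getD_map_range m.toNat _ [] i hi, getD_map_range n.toNat _ 0 j hj]
    simp [bbW, hin]
  | succ s ih =>
    intro i j hi hj
    rw [Function.iterate_succ_apply']
    rw [bbStep]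
    rw [getD_map_range m.toNat _ [] i hi]
    rw [getD_map_range n.toNat _ 0 j hj]
    have hin : 0 ≤ (i : Int) ∧ (i : Int) < m ∧ 0 ≤ (j : Int) ∧ (j : Int) < n := by omega
    have hnb : ∀ rr cc : Int,
        bbNeighbor m n ((bbStep m n)^[s]
          ((List.range m.toNat).map (fun _ => (List.range n.toNat).map (fun _ => (0 : Int))))) rr cc
        = bbW m n s rr cc := by
      intro rr cc
      by_cases hrc : 0 ≤ rr ∧ rr < m ∧ 0 ≤ cc ∧ cc < n
      · rw [bbNeighbor, if_neg (by exact fun h => h hrc)]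
        have hrr : rr.toNat < m.toNat := by omega
        have hcc : cc.toNat < n.toNat := by omega
        have := ih rr.toNat cc.toNat hrr hcc
        rwa [Int.toNat_of_nonneg hrc.1, Int.toNat_of_nonneg hrc.2.2.1] at this
      · rw [bbNeighbor, if_pos hrc, bbW_oob m n s rr cc hrc]
    rw [hnb, hnb, hnb, hnb, bbW, if_pos hin]

-- ===== VERDICT (by name: the statements are the Claim_ definitions above) =====
theorem breaking_boundaries_spec : Claim_unchanged_breaking_boundaries := by
  intro m n k r c _ hpre hnd
  unfold breaking_boundaries breaking_boundaries_alt
  by_cases hin : 0 ≤ r ∧ r < m ∧ 0 ≤ c ∧ c < n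
  · rw [if_neg (by exact fun h => h hin)]
    have hk : 0 ≤ k := by
      rcases hpre with h | ⟨hm, hn⟩ | ⟨hk, _⟩
      · exact absurd hin h
      · by_contra hneg
        exact hnd ⟨by omega, hm, hn, by omega, by omega⟩
      · exact hk
    have hempty : GoodMemo m n (PySem.Dict.empty (κ := Int × Int × Int) (ν := Int)) := by
      intro r' c' kk' v' hget
      simp [PySem.Dict.get?_empty] at hget
    have hA := (bbARec_correct m n (k.toNat + 1) k r c PySem.Dict.empty hk (by omega) hempty).1
    have hB := table_correct m n k.toNat r.toNat c.toNat (by omega) (by omega)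
    rw [Int.toNat_of_nonneg hin.1, Int.toNat_of_nonneg hin.2.2.1] at hB
    simp only [bbLoop_eq_iterate]
    rw [hA, hB]
  · rw [if_pos hin]
    have hrow : ¬(0 ≤ r ∧ r < m) ∨ ¬(0 ≤ c ∧ c < n) := by
      by_contra hcon
      push_neg at hcon
      exact hin ⟨hcon.1.1, hcon.1.2, hcon.2.1, hcon.2.2⟩
    rw [bbARec, if_pos hrow]

theorem breaking_boundaries_changed : Claim_changed_breaking_boundaries := by
  unfold Claim_changed_breaking_boundaries; decide

theorem breaking_boundaries_tight : Claim_exact_breaking_boundaries := by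
  intro m n k r c _ _ hd
  obtain ⟨hk, hm, hn, hr, hc⟩ := hd
  subst hm; subst hn; subst hr; subst hc
  have hkt : k.toNat = 0 := by omega
  have hk0 : k ≠ 0 := by omega
  unfold breaking_boundaries breaking_boundaries_alt
  rw [hkt]
  have hA : (bbARec 1 1 1 k 0 0 PySem.Dict.empty).1 = 4 := by
    rw [bbARec]
    rw [if_neg (by norm_num), if_neg hk0]
    rw [PySem.Dict.get?_empty]
    simp only [bbARec]
    norm_num
  rw [hA]
  norm_num [bbLoop, getD_map_range]
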